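-- pv_equiv track=rewrite | github.com/pypi-data/pypi-mirror-98 | packages/flexirpg/flexirpg-1.98.3-py3-none-any.whl/orpg/tools/tab_complete.py | tab_complete
-- ===== SOURCE A (Python) =====
-- def tab_complete(partial, strs):
--     """Tab-complete a partial string from a list of possible strings.
--
--     Returns the longer "tab completion" string of @partial from the
--     list of strings @strs, or None if there's no matching completion.
--
--     """
--
--     # Find all the possible matches.
--     matches = []
--     for s in strs:
--         if s.startswith(partial):
--             matches.append(s)
--
--     # No matches.
--     if not matches:
--         return None
--
--     # Single match, return the whole match.
--     if len(matches) == 1: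
--         return matches[0]
--
--     # Multiple matches, find the longest common prefix between all the
--     # matches.
--     shortest_match = min(matches, key=len)
--     longest_prefix = partial
--     for i in range(len(partial), len(shortest_match)):
--         possible_prefix = shortest_match[:i+1]
--         if all(x.startswith(possible_prefix) for x in matches):
--             longest_prefix = possible_prefix
--     return longest_prefix
-- ===== SOURCE B (Python) =====
-- def tab_complete(partial, strs):
--     """Single-pass tab completion: keep a running common prefix of the
--     matches instead of collecting them and re-scanning per length."""
--     prefix = None
--     for s in strs:
--         if not s.startswith(partial):
--             continue
--         if prefix is None:
--             prefix = s
--         else: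
--             i = 0
--             n = min(len(prefix), len(s))
--             while i < n and prefix[i] == s[i]:
--                 i += 1
--             prefix = prefix[:i]
--     return prefix
-- ===== Notes on version B (the rewrite author's own statement) =====
-- stated objective: alternative
-- what changed: B replaces A's collect-matches + min-by-length + per-candidate-length all-startswith rescans with a single pass that folds a running pairwise longest-common-prefix over the matching strings.
import Mathlib
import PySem

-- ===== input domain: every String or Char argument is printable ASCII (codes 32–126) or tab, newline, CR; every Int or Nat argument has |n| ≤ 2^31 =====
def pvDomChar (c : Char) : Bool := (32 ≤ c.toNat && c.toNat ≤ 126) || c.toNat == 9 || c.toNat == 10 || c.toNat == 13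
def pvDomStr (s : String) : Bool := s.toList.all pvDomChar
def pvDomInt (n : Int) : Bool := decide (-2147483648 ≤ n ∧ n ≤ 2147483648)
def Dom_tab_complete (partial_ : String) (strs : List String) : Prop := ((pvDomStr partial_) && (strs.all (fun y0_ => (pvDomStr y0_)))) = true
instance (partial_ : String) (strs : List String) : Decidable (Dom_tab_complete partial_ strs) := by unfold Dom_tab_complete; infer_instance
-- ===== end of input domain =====

-- B replaces A's collect-matches + min-by-length + per-length all-startswith rescans with a
-- single pass folding a running pairwise longest-common-prefix over the matching strings.

-- ===== PORT A =====
def tab_complete (partial_ : String) (strs : List String) : Option String :=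
  -- matches = []; for s in strs: if s.startswith(partial): matches.append(s)
  let ms := strs.foldl (fun acc s => if PySem.Str.startswith s partial_ then acc ++ [s] else acc) []
  if ms = [] then none
  else if ms.length = 1 then PySem.List.pyGet? ms 0
  else
    match PySem.List.min? ms (fun s => PySem.Str.len s) with
    | none => none   -- unreachable: ms ≠ []
    | some shortest =>
      some ((PySem.List.pyRange (PySem.Str.len partial_) (PySem.Str.len shortest) 1).foldl
        (fun longest_prefix i =>
          if ms.all (fun x => PySem.Str.startswith x (PySem.Str.slice shortest none (some (i + 1)))) then
            PySem.Str.slice shortest none (some (i + 1))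
          else longest_prefix) partial_)

-- ===== PORT B =====
-- the inner while loop of Source B: scan the two strings char by char, keep the common prefix
def pvLcp : List Char → List Char → List Char
  | a :: xs, b :: ys => if a = b then a :: pvLcp xs ys else []
  | _, _ => []

-- the loop body after the startswith guard: first match starts the prefix, later ones shrink it
def pvStep (prefix? : Option (List Char)) (s : String) : Option (List Char) :=
  match prefix? with
  | none => some s.toList
  | some p => some (pvLcp p s.toList)

def tab_complete_alt (partial_ : String) (strs : List String) : Option String :=
  (strs.foldl (fun prefix? s =>
      if PySem.Str.startswith s partial_ then pvStep prefix? s else prefix?) none).map String.ofList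

-- ===== PRECONDITION & SPEC =====
def Spec_tab_complete (partial_ : String) (strs : List String) (out : Option String) : Prop := out = tab_complete_alt partial_ strs
instance (partial_ : String) (strs : List String) (out : Option String) : Decidable (Spec_tab_complete partial_ strs out) := by unfold Spec_tab_complete; infer_instance

-- ===== CLAIM (what is proved, stated in full; the proofs are below) =====
def Claim_equal_tab_complete : Prop := ∀ (partial_ : String) (strs : List String), Dom_tab_complete partial_ strs → Spec_tab_complete partial_ strs (tab_complete partial_ strs)

-- ===== LEMMAS AND PROOFS =====

theorem pvLcp_prefix_left : ∀ (a b : List Char), pvLcp a b <+: a := by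
  intro a
  induction a with
  | nil => intro b; cases b <;> simp [pvLcp]
  | cons x xs ih =>
    intro b
    cases b with
    | nil => simp [pvLcp]
    | cons y ys =>
      by_cases h : x = y
      · subst h
        simp only [pvLcp]
        exact List.cons_prefix_cons.mpr ⟨rfl, ih ys⟩
      · simp [pvLcp, h]

theorem pvLcp_prefix_right : ∀ (a b : List Char), pvLcp a b <+: b := by
  intro a
  induction a with
  | nil => intro b; cases b <;> simp [pvLcp]
  | cons x xs ih =>
    intro b
    cases b with
    | nil => simp [pvLcp]
    | cons y ys =>
      by_cases h : x = y
      · subst h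
        simp only [pvLcp]
        exact List.cons_prefix_cons.mpr ⟨rfl, ih ys⟩
      · simp [pvLcp, h]

theorem pvLcp_greatest : ∀ (c a b : List Char), c <+: a → c <+: b → c <+: pvLcp a b := by
  intro c
  induction c with
  | nil => intro a b _ _; simp
  | cons z zs ih =>
    intro a b ha hb
    cases a with
    | nil => exact absurd ha (by simp)
    | cons x xs =>
      cases b with
      | nil => exact absurd hb (by simp)
      | cons y ys =>
        obtain ⟨hzx, ha'⟩ := List.cons_prefix_cons.mp ha
        obtain ⟨hzy, hb'⟩ := List.cons_prefix_cons.mp hb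
        subst hzx
        subst hzy
        simp only [pvLcp]
        exact List.cons_prefix_cons.mpr ⟨rfl, ih _ _ ha' hb'⟩

-- the fold B performs over the tail of the matches
def pvLcps (m : List Char) (tail : List String) : List Char :=
  tail.foldl (fun q s => pvLcp q s.toList) m

theorem pvLcps_prefix : ∀ (tail : List String) (m : List Char),
    (pvLcps m tail <+: m) ∧ (∀ s ∈ tail, pvLcps m tail <+: s.toList) := by
  intro tail
  induction tail with
  | nil => intro m; exact ⟨List.prefix_refl m, by simp⟩
  | cons s t ih =>
    intro m
    have hc : pvLcps m (s :: t) = pvLcps (pvLcp m s.toList) t := rfl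
    refine ⟨?_, ?_⟩
    · rw [hc]; exact (ih _).1.trans (pvLcp_prefix_left _ _)
    · intro x hx
      rcases List.mem_cons.mp hx with h | h
      · subst h; rw [hc]; exact (ih _).1.trans (pvLcp_prefix_right _ _)
      · rw [hc]; exact (ih _).2 x h

theorem pvLcps_greatest : ∀ (tail : List String) (m c : List Char),
    c <+: m → (∀ s ∈ tail, c <+: s.toList) → c <+: pvLcps m tail := by
  intro tail
  induction tail with
  | nil => intro m c h _; exact h
  | cons s t ih =>
    intro m c hm hs
    have hc : pvLcps m (s :: t) = pvLcps (pvLcp m s.toList) t := rfl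
    rw [hc]
    exact ih _ _ (pvLcp_greatest _ _ _ hm (hs s (by simp))) (fun x hx => hs x (by simp [hx]))

theorem altB_filter (partial_ : String) : ∀ (l : List String) (o : Option (List Char)),
    l.foldl (fun prefix? s =>
        if PySem.Str.startswith s partial_ then pvStep prefix? s else prefix?) o
      = (l.filter fun s => PySem.Str.startswith s partial_).foldl pvStep o := by
  intro l
  induction l with
  | nil => intro o; rfl
  | cons s t ih =>
    intro o
    rw [List.foldl_cons, List.filter_cons]
    by_cases h : PySem.Str.startswith s partial_
    · rw [if_pos h, if_pos h, List.foldl_cons]; exact ih _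
    · rw [if_neg h, if_neg h]; exact ih _

theorem aFold_filter (partial_ : String) : ∀ (l acc : List String),
    l.foldl (fun acc s => if PySem.Str.startswith s partial_ then acc ++ [s] else acc) acc
      = acc ++ l.filter (fun s => PySem.Str.startswith s partial_) := by
  intro l
  induction l with
  | nil => intro acc; simp
  | cons s t ih =>
    intro acc
    rw [List.foldl_cons, List.filter_cons]
    by_cases h : PySem.Str.startswith s partial_
    · rw [if_pos h, if_pos h, ih, List.append_assoc]; rfl
    · rw [if_neg h, if_neg h]; exact ih _

theorem foldl_pvStep_some : ∀ (t : List String) (p : List Char),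
    t.foldl pvStep (some p) = some (pvLcps p t) := by
  intro t
  induction t with
  | nil => intro p; rfl
  | cons s t ih => intro p; simpa [pvStep, pvLcps] using ih (pvLcp p s.toList)

theorem cond_iff (ms : List String) (shortest : String) (L : List Char)
    (hgreat : ∀ c : List Char, (∀ x ∈ ms, c <+: x.toList) → c <+: L)
    (hall : ∀ x ∈ ms, L <+: x.toList)
    (hLs : L <+: shortest.toList)
    (i : Int) (h0 : 0 ≤ i) (hib : i < (shortest.toList.length : Int)) :
    ((ms.all fun x => PySem.Str.startswith x (PySem.Str.slice shortest none (some (i + 1)))) = true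
      ↔ i + 1 ≤ (L.length : Int)) := by
  have hn : ((i + 1).toNat : Int) = i + 1 := Int.toNat_of_nonneg (by omega)
  have hnle : (i + 1).toNat ≤ shortest.toList.length := by omega
  have hpp : (PySem.Str.slice shortest none (some (i + 1))).toList
      = shortest.toList.take (i + 1).toNat := by
    have h1 : (PySem.Str.slice shortest none (some (i + 1))).toList
        = PySem.List.slice shortest.toList none (some (i + 1)) := by simp
    rw [h1, PySem.List.slice_to shortest.toList (by omega)]
  have hiff : ∀ (x : String),
      (PySem.Str.startswith x (PySem.Str.slice shortest none (some (i + 1))) = true)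
        ↔ shortest.toList.take (i + 1).toNat <+: x.toList := by
    intro x
    rw [PySem.Str.startswith_eq, PySem.Chars.startswith_iff, hpp]
  constructor
  · intro h
    have hc : ∀ x ∈ ms, shortest.toList.take (i + 1).toNat <+: x.toList := by
      intro x hx
      exact (hiff x).mp (List.all_eq_true.mp h x hx)
    have hlen := (hgreat _ hc).length_le
    rw [List.length_take] at hlen
    omega
  · intro h
    have hK : (i + 1).toNat ≤ L.length := by omega
    have hLtake : L = shortest.toList.take L.length := List.prefix_iff_eq_take.mp hLs
    have htake : shortest.toList.take (i + 1).toNat <+: L := by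
      have he : shortest.toList.take (i + 1).toNat = L.take (i + 1).toNat := by
        conv_rhs => rw [hLtake]
        rw [List.take_take, Nat.min_eq_left hK]
      rw [he]
      exact List.take_prefix _ _
    refine List.all_eq_true.mpr ?_
    intro x hx
    exact (hiff x).mpr (htake.trans (hall x hx))

theorem loopA_keep (ms : List String) (shortest : String) :
    ∀ (l : List Int) (init : String),
    (∀ i ∈ l, (ms.all fun x => PySem.Str.startswith x (PySem.Str.slice shortest none (some (i + 1)))) = false) →
    l.foldl
      (fun longest_prefix i =>
        if ms.all (fun x => PySem.Str.startswith x (PySem.Str.slice shortest none (some (i + 1)))) then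
          PySem.Str.slice shortest none (some (i + 1))
        else longest_prefix) init = init := by
  intro l
  induction l with
  | nil => intro init _; rfl
  | cons j t ih =>
    intro init h
    have hj := h j (by simp)
    have hj' : ¬ ((ms.all fun x => PySem.Str.startswith x (PySem.Str.slice shortest none (some (j + 1)))) = true) := by
      rw [hj]; simp
    rw [List.foldl_cons, if_neg hj']
    exact ih init (fun i hi => h i (by simp [hi]))

theorem loopA_last (ms : List String) (shortest : String) (a b : Int) (init : String)
    (hab : a < b)
    (hC : (ms.all fun x => PySem.Str.startswith x (PySem.Str.slice shortest none (some ((b - 1) + 1)))) = true) :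
    (PySem.List.pyRange a b 1).foldl
      (fun longest_prefix i =>
        if ms.all (fun x => PySem.Str.startswith x (PySem.Str.slice shortest none (some (i + 1)))) then
          PySem.Str.slice shortest none (some (i + 1))
        else longest_prefix) init
      = PySem.Str.slice shortest none (some ((b - 1) + 1)) := by
  have h : PySem.List.pyRange a b 1 = PySem.List.pyRange a (b - 1) 1 ++ [b - 1] := by
    have h2 := PySem.List.pyRange_one_succ_right (a := a) (b := b - 1) (by omega)
    rw [show b - 1 + 1 = b from by ring] at h2
    exact h2
  rw [h, List.foldl_append, List.foldl_cons, List.foldl_nil, if_pos hC]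

theorem tab_complete_spec : Claim_equal_tab_complete := by
  intro partial_ strs _
  unfold Spec_tab_complete
  simp only [tab_complete, tab_complete_alt]
  rw [aFold_filter, altB_filter, List.nil_append]
  generalize hms : strs.filter (fun s => PySem.Str.startswith s partial_) = ms
  have hmem : ∀ x ∈ ms, partial_.toList <+: x.toList := by
    intro x hx
    rw [← hms] at hx
    have h := (List.mem_filter.mp hx).2
    rw [PySem.Str.startswith_eq, PySem.Chars.startswith_iff] at h
    exact h
  cases ms with
  | nil => simp
  | cons m tail =>
    cases tail with
    | nil =>
      rw [if_neg (by simp), if_pos (by simp)]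
      simp [PySem.List.pyGet?, PySem.List.pyIdx?, pvStep]
    | cons s2 rest =>
      rw [if_neg (by simp), if_neg (by simp)]
      conv_rhs => rw [List.foldl_cons, show pvStep none m = some m.toList from rfl,
        foldl_pvStep_some]
      set L := pvLcps m.toList (s2 :: rest) with hLdef
      have hLall : ∀ x ∈ (m :: s2 :: rest), L <+: x.toList := by
        intro x hx
        rcases List.mem_cons.mp hx with h | h
        · subst h; exact (pvLcps_prefix _ _).1
        · exact (pvLcps_prefix _ _).2 x h
      have hgreat : ∀ c : List Char, (∀ x ∈ (m :: s2 :: rest), c <+: x.toList) → c <+: L :=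
        fun c h => pvLcps_greatest _ _ _ (h m (by simp)) (fun x hx => h x (by simp [hx]))
      have hpL : partial_.toList <+: L := hgreat _ hmem
      split
      · next hmin =>
        rw [PySem.List.min?_eq_none_iff] at hmin
        exact absurd hmin (by simp)
      · next shortest hmin =>
        have hsmem : shortest ∈ m :: s2 :: rest := PySem.List.min?_mem hmin
        have hLs : L <+: shortest.toList := hLall shortest hsmem
        have hlenp : PySem.Str.len partial_ = ((partial_.toList.length : Nat) : Int) := by
          simp
        have hlens : PySem.Str.len shortest = ((shortest.toList.length : Nat) : Int) := by
          simp
        rw [hlenp, hlens]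
        have hpK : partial_.toList.length ≤ L.length := hpL.length_le
        have hKs : L.length ≤ shortest.toList.length := hLs.length_le
        have hcond := cond_iff (m :: s2 :: rest) shortest L hgreat hLall hLs
        by_cases hK : partial_.toList.length = L.length
        · -- the common prefix is partial itself: no loop iteration updates it
          rw [loopA_keep _ _ _ _ ?_]
          · have hLp : L = partial_.toList := (hpL.eq_of_length (by omega)).symm
            rw [hLp]
            simp
          · intro i hi
            obtain ⟨hai, hib⟩ := PySem.List.mem_pyRange_one.mp hi
            have h0 : (0 : Int) ≤ i := le_trans (Int.natCast_nonneg _) hai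
            cases hb : (m :: s2 :: rest).all
                (fun x => PySem.Str.startswith x (PySem.Str.slice shortest none (some (i + 1)))) with
            | false => rfl
            | true => exact absurd ((hcond i h0 hib).mp hb) (by omega)
        · -- partial is a proper prefix of the common prefix: the last update wins
          have hsplit := PySem.List.pyRange_one_append (partial_.toList.length : Int)
            (L.length : Int) (shortest.toList.length : Int) (by omega) (by omega)
          rw [hsplit, List.foldl_append]
          rw [loopA_keep _ _ _ _ ?_]
          · rw [loopA_last _ _ _ _ _ (by omega)
              ((hcond ((L.length : Int) - 1) (by omega) (by omega)).mpr (by omega))]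
            rw [show (L.length : Int) - 1 + 1 = (L.length : Int) from by ring]
            have hfin : (PySem.Str.slice shortest none (some (L.length : Int))).toList = L := by
              have h1 : (PySem.Str.slice shortest none (some (L.length : Int))).toList
                  = PySem.List.slice shortest.toList none (some (L.length : Int)) := by simp
              rw [h1, PySem.List.slice_to shortest.toList (by omega), Int.toNat_natCast]
              exact (List.prefix_iff_eq_take.mp hLs).symm
            have hof : String.ofList L = PySem.Str.slice shortest none (some (L.length : Int)) := by
              apply String.toList_inj.mp
              rw [hfin]
              simp
            rw [Option.map_some, hof]
          · intro i hi
            obtain ⟨hai, hib⟩ := PySem.List.mem_pyRange_one.mp hi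
            have h0 : (0 : Int) ≤ i := le_trans (Int.natCast_nonneg _) hai
            cases hb : (m :: s2 :: rest).all
                (fun x => PySem.Str.startswith x (PySem.Str.slice shortest none (some (i + 1)))) with
            | false => rfl
            | true => exact absurd ((hcond i h0 hib).mp hb) (by omega)
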